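-- pv_equiv track=rewrite | github.com/AstralRhythm/labyrinth | labyrinth.py | erasedLoopStrs
-- ===== SOURCE A (Python) =====
-- def erasedLoopStrs(inputList):
--   #function that erases tile sequences from findPath that loop: i.e. if inputList=["1,0","2,0","2,1","2,0""1,0","1,1","1,2"] then ["1,0","1,1","1,2"] will be returned
--   for m in range(len(inputList)):
--     for n in range(len(inputList)):
--       if inputList[m]==inputList[n] and m!=n:
--         for z in range(min(m,n),max(m,n)):
--           inputList.pop(min(m,n))
--         return erasedLoopStrs(inputList)
--   return inputList
-- ===== SOURCE B (Python) =====
-- # B: single forward pass that truncates the growing path at a repeated tile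
-- # (A mutates inputList in place via pop; B does not -- equivalence is about the return value).
-- def erasedLoopStrs(inputList):
--   path = []
--   for tile in inputList:
--     if tile in path:
--       path = path[:path.index(tile) + 1]
--     else:
--       path.append(tile)
--   return path
-- ===== Notes on version B (the rewrite author's own statement) =====
-- stated objective: faster
-- what changed: Replaces A's repeated quadratic duplicate-scan plus segment-pop recursion by a single forward pass that grows a path and truncates it back to the first occurrence when a tile repeats.
import Mathlib
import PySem

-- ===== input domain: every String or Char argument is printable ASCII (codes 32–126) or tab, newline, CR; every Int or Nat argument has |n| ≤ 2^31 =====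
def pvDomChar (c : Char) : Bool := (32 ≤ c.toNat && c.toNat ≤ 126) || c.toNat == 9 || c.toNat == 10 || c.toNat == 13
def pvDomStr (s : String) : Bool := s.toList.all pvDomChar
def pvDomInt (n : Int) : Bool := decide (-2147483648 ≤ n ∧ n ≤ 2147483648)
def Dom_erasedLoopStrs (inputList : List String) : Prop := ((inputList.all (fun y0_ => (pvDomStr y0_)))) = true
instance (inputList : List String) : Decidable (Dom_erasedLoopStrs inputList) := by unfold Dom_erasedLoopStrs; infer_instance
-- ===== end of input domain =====

-- B replaces A's repeated duplicate-scan-and-pop recursion by one forward pass that truncates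
-- the growing path at a repeated tile (faster). A mutates inputList in place via pop; the
-- equivalence proved here is about the RETURN value only.

-- ===== PORT A =====
-- inner loop `for n in range(len(inputList))` with early return, over the index list
def pvFindNGo (l : List String) (m : Nat) : List Nat → Option Nat
  | [] => none
  | n :: ns => if l.getD m "" == l.getD n "" && m != n then some n else pvFindNGo l m ns

-- outer loop `for m in range(len(inputList))` with early return, over the index list

def pvFindMGo (l : List String) : List Nat → Option (Nat × Nat)
  | [] => none
  | m :: ms =>
    match pvFindNGo l m (List.range l.length) with
    | some n => some (m, n)
    | none => pvFindMGo l ms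

def pvFindM (l : List String) : Option (Nat × Nat) := pvFindMGo l (List.range l.length)

-- A's recursion: `for z in range(min(m,n),max(m,n)): inputList.pop(min(m,n))` removes the slice
-- [min, max), leaving l.take (min m n) ++ l.drop (max m n), then A recurses on the shortened
-- list.  Each step removes at least one element, so length-many steps of fuel always suffice
-- (the fuel is a totality guard, never exhausted on the recursion A performs).

def erasedLoopStrsGo (fuel : Nat) (l : List String) : List String :=
  match fuel with
  | 0 => l
  | fuel + 1 =>
    match pvFindM l with
    | none => l
    | some (m, n) => erasedLoopStrsGo fuel (l.take (min m n) ++ l.drop (max m n))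

def erasedLoopStrs (inputList : List String) : List String :=
  erasedLoopStrsGo inputList.length inputList

-- characterisations

-- ===== PORT B =====
-- `if tile in path: path = path[:path.index(tile)+1] else: path.append(tile)`

def pvStep (path : List String) (tile : String) : List String :=
  if path.contains tile then path.take (((PySem.List.index? path tile).getD 0) + 1)
  else path ++ [tile]

def erasedLoopStrs_alt (inputList : List String) : List String :=
  inputList.foldl pvStep []

-- ===== PRECONDITION & SPEC =====
def Spec_erasedLoopStrs (inputList : List String) (out : List String) : Prop := out = erasedLoopStrs_alt inputList
instance (inputList : List String) (out : List String) : Decidable (Spec_erasedLoopStrs inputList out) := by unfold Spec_erasedLoopStrs; infer_instance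

-- ===== CLAIM (what is proved, stated in full; the proofs are below) =====
def Claim_equal_erasedLoopStrs : Prop := ∀ (inputList : List String), Dom_erasedLoopStrs inputList → Spec_erasedLoopStrs inputList (erasedLoopStrs inputList)

-- ===== LEMMAS AND PROOFS =====
-- first-hit characterisations of A's two scans

theorem goN_some {l : List String} {m : Nat} : ∀ {ns : List Nat} {n : Nat},
    pvFindNGo l m ns = some n →
    ∃ as bs, ns = as ++ n :: bs ∧ (l.getD m "" = l.getD n "" ∧ m ≠ n) ∧
      ∀ k ∈ as, ¬(l.getD m "" = l.getD k "" ∧ m ≠ k) := by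
  intro ns
  induction ns with
  | nil => intro n h; cases h
  | cons n' ns ih =>
    intro n h
    by_cases hc : (l.getD m "" == l.getD n' "" && m != n') = true
    · rw [pvFindNGo, if_pos hc] at h
      cases h
      simp only [Bool.and_eq_true, beq_iff_eq, bne_iff_ne, ne_eq] at hc
      exact ⟨[], ns, rfl, ⟨hc.1, hc.2⟩, by simp⟩
    · rw [pvFindNGo, if_neg hc] at h
      obtain ⟨as, bs, rfl, hp, hno⟩ := ih h
      refine ⟨n' :: as, bs, rfl, hp, ?_⟩
      intro k hk
      rcases List.mem_cons.1 hk with rfl | hk'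
      · intro hcc
        exact hc (by simp only [Bool.and_eq_true, beq_iff_eq, bne_iff_ne]; exact ⟨hcc.1, hcc.2⟩)
      · exact hno k hk'

theorem goN_none {l : List String} {m : Nat} : ∀ {ns : List Nat},
    pvFindNGo l m ns = none → ∀ k ∈ ns, ¬(l.getD m "" = l.getD k "" ∧ m ≠ k) := by
  intro ns
  induction ns with
  | nil => intro _ k hk; cases hk
  | cons n' ns ih =>
    intro h k hk
    by_cases hc : (l.getD m "" == l.getD n' "" && m != n') = true
    · rw [pvFindNGo, if_pos hc] at h; cases h
    · rw [pvFindNGo, if_neg hc] at h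
      rcases List.mem_cons.1 hk with rfl | hk'
      · intro hcc
        exact hc (by simp only [Bool.and_eq_true, beq_iff_eq, bne_iff_ne]; exact ⟨hcc.1, hcc.2⟩)
      · exact ih h k hk'

theorem goM_some {l : List String} : ∀ {ms : List Nat} {m n : Nat},
    pvFindMGo l ms = some (m, n) →
    ∃ as bs, ms = as ++ m :: bs ∧ pvFindNGo l m (List.range l.length) = some n ∧
      ∀ k ∈ as, pvFindNGo l k (List.range l.length) = none := by
  intro ms
  induction ms with
  | nil => intro m n h; cases h
  | cons m' ms ih =>
    intro m n h
    rw [pvFindMGo] at h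
    cases hfn : pvFindNGo l m' (List.range l.length) with
    | some n' => rw [hfn] at h; cases h; exact ⟨[], ms, rfl, hfn, by simp⟩
    | none =>
      rw [hfn] at h
      obtain ⟨as, bs, rfl, hsome, hno⟩ := ih h
      refine ⟨m' :: as, bs, rfl, hsome, ?_⟩
      intro k hk
      rcases List.mem_cons.1 hk with rfl | hk'
      · exact hfn
      · exact hno k hk'

theorem goM_none {l : List String} : ∀ {ms : List Nat},
    pvFindMGo l ms = none → ∀ k ∈ ms, pvFindNGo l k (List.range l.length) = none := by
  intro ms
  induction ms with
  | nil => intro _ k hk; cases hk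
  | cons m' ms ih =>
    intro h k hk
    rw [pvFindMGo] at h
    cases hfn : pvFindNGo l m' (List.range l.length) with
    | some n' => rw [hfn] at h; cases h
    | none =>
      rw [hfn] at h
      rcases List.mem_cons.1 hk with rfl | hk'
      · exact hfn
      · exact ih h k hk'

theorem range_decomp {L n : Nat} {as bs : List Nat} (h : List.range L = as ++ n :: bs) :
    n < L ∧ as = List.range n := by
  have hlen : as.length < L := by
    have := congrArg List.length h
    simp at this
    omega
  have h1 : (List.range L)[as.length]? = some as.length := by
    simp [List.getElem?_range hlen]
  have h2 : (List.range L)[as.length]? = some n := by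
    rw [h, List.getElem?_append_right (le_refl as.length)]
    simp
  have hn : n = as.length := by
    rw [h1] at h2; exact (Option.some_inj.1 h2).symm
  subst hn
  refine ⟨hlen, ?_⟩
  have h3 : (List.range L).take as.length = as := by rw [h]; exact List.take_left
  conv_rhs => rw [← Nat.min_eq_left (le_of_lt hlen), ← List.take_range, h3]
-- specialised to the actual index lists

theorem pvFindN_facts {l : List String} {m n : Nat}
    (h : pvFindNGo l m (List.range l.length) = some n) :
    n < l.length ∧ l.getD m "" = l.getD n "" ∧ m ≠ n ∧
      ∀ k, k < n → ¬(l.getD m "" = l.getD k "" ∧ m ≠ k) := by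
  obtain ⟨as, bs, hdec, hp, hno⟩ := goN_some h
  obtain ⟨hn, rfl⟩ := range_decomp hdec
  exact ⟨hn, hp.1, hp.2, fun k hk => hno k (List.mem_range.2 hk)⟩

theorem pvFindN_none_facts {l : List String} {m : Nat}
    (h : pvFindNGo l m (List.range l.length) = none) :
    ∀ k, k < l.length → ¬(l.getD m "" = l.getD k "" ∧ m ≠ k) :=
  fun k hk => goN_none h k (List.mem_range.2 hk)

theorem pvFindM_facts {l : List String} {m n : Nat} (h : pvFindM l = some (m, n)) :
    m < l.length ∧ pvFindNGo l m (List.range l.length) = some n ∧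
      ∀ k, k < m → pvFindNGo l k (List.range l.length) = none := by
  obtain ⟨as, bs, hdec, hsome, hno⟩ := goM_some h
  obtain ⟨hm, rfl⟩ := range_decomp hdec
  exact ⟨hm, hsome, fun k hk => hno k (List.mem_range.2 hk)⟩

theorem pvFindM_none_facts {l : List String} (h : pvFindM l = none) :
    ∀ k, k < l.length → pvFindNGo l k (List.range l.length) = none :=
  fun k hk => goM_none h k (List.mem_range.2 hk)

theorem nodup_of_getD (l : List String)
    (h : ∀ i j, i < j → j < l.length → l.getD i "" ≠ l.getD j "") : l.Nodup := by
  rw [List.nodup_iff_getElem?_ne_getElem?]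
  intro i j hij hj
  have hi : i < l.length := by omega
  have := h i j hij hj
  simp only [List.getD_eq_getElem?_getD] at this
  rw [List.getElem?_eq_getElem hi, List.getElem?_eq_getElem hj]
  simp only [List.getElem?_eq_getElem hi, List.getElem?_eq_getElem hj, Option.getD_some] at this
  simpa using this

theorem mem_foldl_pvStep (ys : List String) : ∀ (p : List String) (y : String),
    y ∈ List.foldl pvStep p ys → y ∈ p ∨ y ∈ ys := by
  induction ys with
  | nil => intro p y h; exact Or.inl h
  | cons t ts ih =>
    intro p y h
    rcases ih (pvStep p t) y h with h' | h'
    · unfold pvStep at h'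
      split at h'
      · exact Or.inl (List.mem_of_mem_take h')
      · rcases List.mem_append.1 h' with h'' | h''
        · exact Or.inl h''
        · simp at h''; subst h''; exact Or.inr (List.mem_cons_self ..)
    · exact Or.inr (List.mem_cons_of_mem _ h')

theorem foldl_pvStep_nodup (ys : List String) : ∀ p : List String,
    (p ++ ys).Nodup → List.foldl pvStep p ys = p ++ ys := by
  induction ys with
  | nil => intro p _; simp
  | cons t ts ih =>
    intro p hnd
    have ht : t ∉ p := by
      intro hc
      exact (List.disjoint_of_nodup_append hnd) hc (List.mem_cons_self ..)
    have hstep : pvStep p t = p ++ [t] := by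
      unfold pvStep
      rw [if_neg (by simpa using ht)]
    simp only [List.foldl_cons, hstep]
    rw [ih (p ++ [t]) (by simpa using hnd)]
    simp

theorem index?_append_notMem {s : List String} (p : List String) {v : String} (h : v ∉ s) :
    PySem.List.index? (s ++ p) v = (PySem.List.index? p v).map (s.length + ·) := by
  induction s with
  | nil => simp [Option.map_id']
  | cons a s ih =>
    have hav : a ≠ v := fun hc => h (hc ▸ List.mem_cons_self ..)
    rw [List.cons_append, PySem.List.index?_cons_of_ne (s ++ p) hav,
      ih (fun hc => h (List.mem_cons_of_mem _ hc)), Option.map_map]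
    simp only [List.length_cons]
    congr 1
    funext x
    simp; omega

theorem foldl_pvStep_shift (ys : List String) : ∀ (p s : List String),
    (∀ y ∈ ys, y ∉ s) → (∀ y ∈ p, y ∉ s) →
    List.foldl pvStep (s ++ p) ys = s ++ List.foldl pvStep p ys := by
  induction ys with
  | nil => intro p s _ _; simp
  | cons t ts ih =>
    intro p s hys hp
    have ht : t ∉ s := hys t (List.mem_cons_self ..)
    have hstep : pvStep (s ++ p) t = s ++ pvStep p t := by
      by_cases hm : t ∈ p
      · have hk : ∃ k, PySem.List.index? p t = some k :=
          Option.isSome_iff_exists.mp ((PySem.List.index?_isSome_iff ..).mpr hm)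
        obtain ⟨k, hk⟩ := hk
        unfold pvStep
        rw [if_pos (by simp [hm]), if_pos (by simp [hm]),
          index?_append_notMem p ht, hk]
        simp only [Option.map_some, Option.getD_some, Nat.add_assoc]
        exact List.take_length_add_append (k + 1)
      · unfold pvStep
        rw [if_neg (by simp [hm, ht]), if_neg (by simp [hm]), List.append_assoc]
    simp only [List.foldl_cons, hstep]
    by_cases hm : t ∈ p
    · have hk : ∃ k, PySem.List.index? p t = some k :=
        Option.isSome_iff_exists.mp ((PySem.List.index?_isSome_iff ..).mpr hm)
      obtain ⟨k, hk⟩ := hk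
      have hp' : pvStep p t = p.take (k + 1) := by unfold pvStep; rw [if_pos (by simp [hm]), hk]; rfl
      rw [hp']
      exact ih _ s (fun y hy => hys y (List.mem_cons_of_mem _ hy))
        (fun y hy => hp y (List.mem_of_mem_take hy))
    · have hp' : pvStep p t = p ++ [t] := by unfold pvStep; rw [if_neg (by simp [hm])]
      rw [hp']
      refine ih _ s (fun y hy => hys y (List.mem_cons_of_mem _ hy)) (fun y hy => ?_)
      rcases List.mem_append.1 hy with h' | h'
      · exact hp y h'
      · simp at h'; subst h'; exact ht

-- the key step: cutting the loop between the first duplicate pair does not change the fold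

theorem foldl_cut (l : List String) (m n : Nat) (hm : m < l.length) (hn : n < l.length)
    (hmn : m < n) (hx : l.getD m "" = l.getD n "")
    (hF2 : ∀ i, i < m → ∀ j, j < l.length → i ≠ j → l.getD i "" ≠ l.getD j "")
    (hF3 : ∀ k, k < n → k ≠ m → l.getD k "" ≠ l.getD m "") :
    List.foldl pvStep [] l = List.foldl pvStep [] (l.take m ++ l.drop n) := by
  set t := l.take m with htdef
  set x := l.getD m "" with hxdef
  set mid := (l.drop (m+1)).take (n-(m+1)) with hmiddef
  set rest := l.drop (n+1) with hrestdef
  -- pieces of the decomposition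
  have hgx : l[m]'hm = x := (List.getD_eq_getElem l "" hm).symm
  have h1 : l.drop n = x :: rest := by
    rw [List.drop_eq_getElem_cons hn]
    congr 1
    rw [← List.getD_eq_getElem l "" hn, ← hx]
  have h2 : l.drop (m+1) = mid ++ l.drop n := by
    conv_lhs => rw [← List.take_append_drop (n-(m+1)) (l.drop (m+1))]
    rw [List.drop_drop]
    congr 2
    omega
  have hdec : l = t ++ (x :: (mid ++ (x :: rest))) := by
    conv_lhs => rw [← List.take_append_drop m l]
    congr 1
    rw [List.drop_eq_getElem_cons hm, hgx, h2, h1]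
  -- membership facts
  have ht_mem : ∀ y ∈ t, ∃ i, i < m ∧ y = l.getD i "" := by
    intro y hy
    obtain ⟨i, hi, hyi⟩ := List.mem_iff_getElem.1 hy
    have hi' : i < m := by
      have := hi; simp [htdef, List.length_take] at this; omega
    refine ⟨i, hi', ?_⟩
    have hyi' : l[i]'(by omega) = y := by rw [← hyi]; simp [htdef, List.getElem_take]
    rw [List.getD_eq_getElem l "" (by omega)]
    exact hyi'.symm
  have hmid_mem : ∀ y ∈ mid, ∃ j, m + 1 ≤ j ∧ j < n ∧ y = l.getD j "" := by
    intro y hy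
    obtain ⟨i, hi, hyi⟩ := List.mem_iff_getElem.1 hy
    have hi' : i < n - (m+1) := by
      have := hi; simp [hmiddef, List.length_take] at this; omega
    refine ⟨m + 1 + i, by omega, by omega, ?_⟩
    have hyi' : l[m + 1 + i]'(by omega) = y := by
      rw [← hyi]; simp [hmiddef, List.getElem_take, List.getElem_drop]
    rw [List.getD_eq_getElem l "" (by omega)]
    exact hyi'.symm
  have hxt : x ∉ t := by
    intro hc
    obtain ⟨i, hi, hyi⟩ := ht_mem x hc
    exact hF3 i (by omega) (by omega) hyi.symm
  have ht_nodup : t.Nodup := by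
    refine nodup_of_getD t ?_
    intro i j hij hj
    have hj' : j < m := by
      have := hj; simp [htdef, List.length_take] at this; omega
    have hgi : t.getD i "" = l.getD i "" := by
      simp [htdef, List.getD_eq_getElem?_getD, List.getElem?_take_of_lt (by omega : i < m)]
    have hgj : t.getD j "" = l.getD j "" := by
      simp [htdef, List.getD_eq_getElem?_getD, List.getElem?_take_of_lt hj']
    rw [hgi, hgj]
    exact hF2 i (by omega) j (by omega) (by omega)
  have hfold_t : List.foldl pvStep [] t = t := by
    simpa using foldl_pvStep_nodup t [] (by simpa using ht_nodup)
  have hstep_tx : pvStep t x = t ++ [x] := by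
    unfold pvStep; rw [if_neg (by simpa using hxt)]
  have hmid_not : ∀ y ∈ mid, y ∉ t ++ [x] := by
    intro y hy hc
    obtain ⟨j, hj1, hj2, rfl⟩ := hmid_mem y hy
    rcases List.mem_append.1 hc with h' | h'
    · obtain ⟨i, hi, hyi⟩ := ht_mem _ h'
      exact hF2 i hi j (by omega) (by omega) hyi.symm
    · simp at h'
      exact hF3 j hj2 (by omega) h'
  have hshift : List.foldl pvStep (t ++ [x]) mid
      = (t ++ [x]) ++ List.foldl pvStep [] mid := by
    have := foldl_pvStep_shift mid [] (t ++ [x]) hmid_not (by simp)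
    simpa using this
  set Q := List.foldl pvStep [] mid with hQdef
  have hxQ : x ∉ Q := by
    intro hc
    rcases mem_foldl_pvStep mid [] x hc with h' | h'
    · simp at h'
    · obtain ⟨j, hj1, hj2, hyj⟩ := hmid_mem x h'
      exact hF3 j hj2 (by omega) hyj.symm
  have hPx : pvStep ((t ++ [x]) ++ Q) x = t ++ [x] := by
    unfold pvStep
    rw [if_pos (by simp)]
    have hassoc : (t ++ [x]) ++ Q = t ++ (x :: Q) := by simp
    rw [hassoc, index?_append_notMem (x :: Q) hxt, PySem.List.index?_cons_self x Q]
    simp only [Option.map_some, Option.getD_some, Nat.add_zero]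
    rw [List.take_length_add_append 1]
    simp
  calc List.foldl pvStep [] l
      = List.foldl pvStep [] (t ++ (x :: (mid ++ (x :: rest)))) := by rw [← hdec]
    _ = List.foldl pvStep (t ++ [x]) rest := by
        rw [List.foldl_append, hfold_t, List.foldl_cons, hstep_tx, List.foldl_append, hshift,
          List.foldl_cons, hPx]
    _ = List.foldl pvStep [] (t ++ l.drop n) := by
        rw [h1, List.foldl_append, hfold_t, List.foldl_cons, hstep_tx]

theorem erasedLoopStrsGo_eq : ∀ (fuel : Nat) (l : List String), l.length ≤ fuel →
    erasedLoopStrsGo fuel l = erasedLoopStrs_alt l := by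
  intro fuel
  induction fuel with
  | zero =>
    intro l hl
    have : l = [] := List.eq_nil_of_length_eq_zero (by omega)
    subst this
    rfl
  | succ N ih =>
    intro l hl
    rw [erasedLoopStrsGo]
    cases hfm : pvFindM l with
    | none =>
      have hnd : l.Nodup := by
        refine nodup_of_getD l ?_
        intro i j hij hj hc
        exact pvFindN_none_facts (pvFindM_none_facts hfm i (by omega)) j hj ⟨hc, by omega⟩
      unfold erasedLoopStrs_alt
      rw [foldl_pvStep_nodup l [] (by simpa using hnd)]
      simp
    | some p =>
      obtain ⟨m, n⟩ := p
      obtain ⟨hm, hfn, hmin⟩ := pvFindM_facts hfm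
      obtain ⟨hn, hx, hne, hupto⟩ := pvFindN_facts hfn
      have hmn : m < n := by
        rcases Nat.lt_or_ge m n with h' | h'
        · exact h'
        · exfalso
          have hnm : n < m := by omega
          exact pvFindN_none_facts (hmin n hnm) m hm ⟨hx.symm, by omega⟩
      have hF2 : ∀ i, i < m → ∀ j, j < l.length → i ≠ j → l.getD i "" ≠ l.getD j "" := by
        intro i hi j hj hij hc
        exact pvFindN_none_facts (hmin i hi) j hj ⟨hc, by omega⟩
      have hF3 : ∀ k, k < n → k ≠ m → l.getD k "" ≠ l.getD m "" := by
        intro k hk hkm hc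
        exact hupto k hk ⟨hc.symm, by omega⟩
      have hmin' : min m n = m := by omega
      have hmax' : max m n = n := by omega
      simp only [hmin', hmax']
      have hlen : (l.take m ++ l.drop n).length ≤ N := by
        simp only [List.length_append, List.length_take, List.length_drop]
        omega
      rw [ih _ hlen]
      unfold erasedLoopStrs_alt
      exact (foldl_cut l m n hm hn hmn hx hF2 hF3).symm

-- ===== VERDICT (by name: the statement is the Claim_ definition above) =====
theorem erasedLoopStrs_spec : Claim_equal_erasedLoopStrs := by
  intro l _
  unfold Spec_erasedLoopStrs erasedLoopStrs
  exact erasedLoopStrsGo_eq l.length l le_rfl
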